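-- pv_equiv track=rewrite | github.com/ngvinhy/BTCHUONG1 | KTRA.py | ktrakytu
-- ===== SOURCE A (Python) =====
-- def ktrakytu(string: str):
--     s = list(string)
--     while " " in s:
--         s.remove(" ")
--     kq = []
--     solan = []
--     maxsolan = 0
--     for i in range(len(s)):
--         solan.extend([s.count(s[i])])
--         maxsolan = max(solan)
--     for i in range(len(s)):
--         if s.count(s[i]) == maxsolan and s[i] not in kq:
--             kq.extend([s[i]])
--     return f"{kq} xuất hiện {maxsolan} lần"
-- ===== SOURCE B (Python) =====
-- def ktrakytu(string: str):
--     chars = [c for c in string if c != " "]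
--     freq = {}
--     for c in chars:
--         freq[c] = freq.get(c, 0) + 1
--     buckets = {}
--     for c, n in freq.items():
--         buckets.setdefault(n, []).append(c)
--     maxsolan = max(buckets) if buckets else 0
--     kq = buckets.get(maxsolan, [])
--     return f"{kq} xuất hiện {maxsolan} lần"
-- ===== Notes on version B (the rewrite author's own statement) =====
-- stated objective: faster
-- what changed: One pass builds a frequency dict, which is inverted into count->chars buckets; the answer is the bucket of the maximum count, replacing A's quadratic repeated list.count scans and one-at-a-time space removal.
import Mathlib
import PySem

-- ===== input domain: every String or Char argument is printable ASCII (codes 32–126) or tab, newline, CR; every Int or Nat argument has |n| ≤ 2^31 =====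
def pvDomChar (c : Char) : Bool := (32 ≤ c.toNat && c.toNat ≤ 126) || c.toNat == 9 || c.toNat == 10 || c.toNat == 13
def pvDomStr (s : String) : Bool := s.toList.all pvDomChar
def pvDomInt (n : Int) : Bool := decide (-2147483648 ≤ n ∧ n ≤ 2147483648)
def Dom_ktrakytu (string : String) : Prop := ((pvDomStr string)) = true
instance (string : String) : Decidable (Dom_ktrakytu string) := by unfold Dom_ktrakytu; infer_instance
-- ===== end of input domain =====

-- B replaces A's quadratic repeated list.count scans (and one-at-a-time space removal) with one
-- frequency dict inverted into count→chars buckets; objective: faster (asymptotic).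

-- shared formatting of the returned f-string f"{kq} xuất hiện {maxsolan} lần" (identical in A and B):
-- Python's repr of a one-character string, exact on the stated domain (printable ASCII, tab, LF, CR)
def pvReprChar (c : Char) : List Char :=
  if c = '\'' then ['"', '\'', '"']
  else if c = '\\' then ['\'', '\\', '\\', '\'']
  else if c = '\t' then ['\'', '\\', 't', '\'']
  else if c = '\n' then ['\'', '\\', 'n', '\'']
  else if c = '\r' then ['\'', '\\', 'r', '\'']
  else ['\'', c, '\'']

def pvFmt (kq : List Char) (m : Int) : String :=
  String.ofList ('[' :: PySem.Chars.join (", ".toList) (kq.map pvReprChar) ++ [']']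
    ++ " xuất hiện ".toList ++ PySem.Int.toChars m ++ " lần".toList)

-- ===== PORT A =====
-- while " " in s: s.remove(" ")
def pvRemoveSpaces (s : List Char) : List Char :=
  if h : ' ' ∈ s then pvRemoveSpaces ((PySem.List.remove? s ' ').getD s)
  else s
termination_by s.length
decreasing_by
  rw [PySem.List.remove?_eq_some_erase s ' ' h]
  have h1 := List.length_pos_of_mem h
  simp [List.length_erase_of_mem h]
  omega

-- for i in range(len(s)): solan.extend([s.count(s[i])]); maxsolan = max(solan)
def pvAloop1 (s : List Char) : List Int × Int :=
  (PySem.List.pyRange 0 (s.length : Int) 1).foldl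
    (fun (acc : List Int × Int) i =>
      let solan := acc.1 ++ [((s.count (PySem.List.pyGetD s i ' ') : Int))]
      (solan, (PySem.List.max? solan (fun y => y)).getD 0))
    ([], 0)

-- for i in range(len(s)): if s.count(s[i]) == maxsolan and s[i] not in kq: kq.extend([s[i]])
def pvAloop2 (s : List Char) (maxsolan : Int) : List Char :=
  (PySem.List.pyRange 0 (s.length : Int) 1).foldl
    (fun (kq : List Char) i =>
      let c := PySem.List.pyGetD s i ' '
      if ((s.count c : Int) == maxsolan) && !(kq.contains c) then kq ++ [c] else kq)
    []

def ktrakytu (string : String) : String :=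
  let s := pvRemoveSpaces string.toList
  let maxsolan := (pvAloop1 s).2
  let kq := pvAloop2 s maxsolan
  pvFmt kq maxsolan

-- ===== PORT B =====
-- for c in chars: freq[c] = freq.get(c, 0) + 1
def pvBfreq (chars : List Char) : PySem.Dict Char Int :=
  chars.foldl (fun (d : PySem.Dict Char Int) c => d.insert c (d.getD c 0 + 1)) PySem.Dict.empty

-- for c, n in freq.items(): buckets.setdefault(n, []).append(c)
def pvBbuckets (freq : PySem.Dict Char Int) : PySem.Dict Int (List Char) :=
  freq.items.foldl
    (fun (b : PySem.Dict Int (List Char)) p => b.modify p.2 [] (fun l => l ++ [p.1]))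
    PySem.Dict.empty

def ktrakytu_alt (string : String) : String :=
  let chars := string.toList.filter (fun c => !(c == ' '))
  let buckets := pvBbuckets (pvBfreq chars)
  let maxsolan := match PySem.List.max? (PySem.Dict.keys buckets) (fun y => y) with
    | some m => m
    | none => 0
  let kq := buckets.getD maxsolan []
  pvFmt kq maxsolan

-- ===== PRECONDITION & SPEC =====
def Spec_ktrakytu (string : String) (out : String) : Prop := out = ktrakytu_alt string
instance (string : String) (out : String) : Decidable (Spec_ktrakytu string out) := by unfold Spec_ktrakytu; infer_instance

-- ===== CLAIM (what is proved, stated in full; the proofs are below) =====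
def Claim_equal_ktrakytu : Prop := ∀ (string : String), Dom_ktrakytu string → Spec_ktrakytu string (ktrakytu string)

-- ===== LEMMAS AND PROOFS =====

theorem pv_filter_erase_space (l : List Char) :
    (l.erase ' ').filter (fun c => !(c == ' ')) = l.filter (fun c => !(c == ' ')) := by
  induction l with
  | nil => rfl
  | cons a t ih =>
    by_cases ha : a = ' '
    · subst ha; simp
    · simp [ha, ih]

theorem pvRemoveSpaces_eq (l : List Char) :
    pvRemoveSpaces l = l.filter (fun c => !(c == ' ')) := by
  fun_induction pvRemoveSpaces l with
  | case1 s h ih =>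
    rw [PySem.List.remove?_eq_some_erase s ' ' h] at ih ⊢
    simp only [Option.getD_some] at ih ⊢
    rw [ih, pv_filter_erase_space]
  | case2 s h =>
    symm
    rw [List.filter_eq_self]
    intro a ha
    simp only [Bool.not_eq_eq_eq_not, Bool.not_true, beq_eq_false_iff_ne]
    rintro rfl; exact h ha

-- the solan/maxsolan loop of A, as a plain list fold
theorem pv_solan_fold (g : Char → Int) (l : List Char) :
    ∀ (acc : List Int) (m : Int),
    l.foldl (fun (a : List Int × Int) c =>
        (a.1 ++ [g c], (PySem.List.max? (a.1 ++ [g c]) (fun y => y)).getD 0)) (acc, m)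
      = (acc ++ l.map g,
         if l.isEmpty then m
         else (PySem.List.max? (acc ++ l.map g) (fun y => y)).getD 0) := by
  induction l with
  | nil => simp
  | cons c t ih =>
    intro acc m
    simp only [List.foldl_cons, List.map_cons, List.isEmpty_cons]
    rw [ih]
    cases t with
    | nil => simp
    | cons d u => simp [List.append_assoc]

-- max? is determined by membership
theorem pv_max_congr (l1 l2 : List Int) (h : ∀ x, x ∈ l1 ↔ x ∈ l2) :
    (PySem.List.max? l1 (fun y => y)).getD 0 = (PySem.List.max? l2 (fun y => y)).getD 0 := by
  cases h1 : PySem.List.max? l1 (fun y => y) with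
  | none =>
    rw [PySem.List.max?_eq_none_iff] at h1
    cases h2 : PySem.List.max? l2 (fun y => y) with
    | none => rfl
    | some b =>
      have hb := PySem.List.max?_mem h2
      rw [← h] at hb
      simp [h1] at hb
  | some a =>
    cases h2 : PySem.List.max? l2 (fun y => y) with
    | none =>
      rw [PySem.List.max?_eq_none_iff] at h2
      have ha := PySem.List.max?_mem h1
      rw [h] at ha
      simp [h2] at ha
    | some b =>
      have ha := PySem.List.max?_mem h1
      have hb := PySem.List.max?_mem h2
      have hab := PySem.List.max?_isMax h2 a ((h a).mp ha)
      have hba := PySem.List.max?_isMax h1 b ((h b).mpr hb)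
      simp only [Option.getD_some]
      exact le_antisymm hab hba

-- the kq loop of A builds the first-appearance-ordered distinct chars satisfying p
theorem pv_kq_fold (p : Char → Bool) (l : List Char) :
    ∀ (pre : List Char),
    l.foldl (fun kq c => if p c && !(kq.contains c) then kq ++ [c] else kq)
        ((PySem.Set.ofList pre).filter p)
      = (PySem.Set.ofList (pre ++ l)).filter p := by
  induction l with
  | nil => intro pre; simp
  | cons c t ih =>
    intro pre
    have hstep :
        (if p c && !(((PySem.Set.ofList pre).filter p).contains c)
          then (PySem.Set.ofList pre).filter p ++ [c]
          else (PySem.Set.ofList pre).filter p)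
          = (PySem.Set.ofList (pre ++ [c])).filter p := by
      rw [PySem.Set.ofList_append_singleton, PySem.Set.add_eq_ite]
      by_cases hpc : p c = true
      · by_cases hm : c ∈ PySem.Set.ofList pre
        · have : ((PySem.Set.ofList pre).filter p).contains c = true := by
            simp [List.mem_filter, hm, hpc]
          simp [hpc, hm]
        · have : ((PySem.Set.ofList pre).filter p).contains c = false := by
            simp [List.mem_filter, hm]
          simp [hpc, hm, List.filter_append]
      · simp only [Bool.not_eq_true] at hpc
        by_cases hm : c ∈ PySem.Set.ofList pre
        · simp [hpc, hm]
        · simp [hpc, hm, List.filter_append]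
    calc (c :: t).foldl (fun kq c => if p c && !(kq.contains c) then kq ++ [c] else kq)
            ((PySem.Set.ofList pre).filter p)
        = t.foldl (fun kq c => if p c && !(kq.contains c) then kq ++ [c] else kq)
            ((PySem.Set.ofList (pre ++ [c])).filter p) := by
          rw [List.foldl_cons, hstep]
      _ = (PySem.Set.ofList ((pre ++ [c]) ++ t)).filter p := ih (pre ++ [c])
      _ = (PySem.Set.ofList (pre ++ c :: t)).filter p := by simp

-- A's maxsolan = max of the multiset of counts (0 on empty)
theorem pv_Amax (s : List Char) :
    (pvAloop1 s).2
      = (PySem.List.max? (s.map (fun c => (s.count c : Int))) (fun y => y)).getD 0 := by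
  have heq : pvAloop1 s
      = s.foldl (fun (a : List Int × Int) c =>
          (a.1 ++ [(s.count c : Int)],
            (PySem.List.max? (a.1 ++ [(s.count c : Int)]) (fun y => y)).getD 0)) ([], 0) :=
    PySem.List.foldl_pyRange_zero_pyGetD' s ' '
      (fun (a : List Int × Int) c =>
        (a.1 ++ [(s.count c : Int)],
          (PySem.List.max? (a.1 ++ [(s.count c : Int)]) (fun y => y)).getD 0)) ([], 0)
  rw [heq, pv_solan_fold]
  cases s with
  | nil => simp [PySem.List.max?]
  | cons c t => simp

-- A's kq = the distinct chars (first-appearance order) whose count is maxsolan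
theorem pv_Akq (s : List Char) (m : Int) :
    pvAloop2 s m = (PySem.Set.ofList s).filter (fun c => (s.count c : Int) == m) := by
  have heq : pvAloop2 s m
      = s.foldl (fun kq c =>
          if ((s.count c : Int) == m) && !(kq.contains c) then kq ++ [c] else kq) [] :=
    PySem.List.foldl_pyRange_zero_pyGetD' s ' '
      (fun (kq : List Char) c =>
        if ((s.count c : Int) == m) && !(kq.contains c) then kq ++ [c] else kq) []
  rw [heq]
  simpa using pv_kq_fold (fun c => (s.count c : Int) == m) s []

-- B's buckets, characterised through the counter
theorem pv_Bbuckets_keys (chars : List Char) :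
    (pvBbuckets (pvBfreq chars)).keys
      = PySem.Set.ofList ((PySem.Set.ofList chars).map (fun k => (chars.count k : Int))) := by
  have hfreq : pvBfreq chars = PySem.Dict.counter chars :=
    PySem.Dict.foldl_insert_getD_add_one_eq_counter chars
  have hkeys : (pvBbuckets (pvBfreq chars)).keys
      = PySem.Set.update (PySem.Dict.empty : PySem.Dict Int (List Char)).keys
          (((pvBfreq chars).items).map (fun p => p.2)) :=
    PySem.Dict.keys_foldl_modify_key ((pvBfreq chars).items) (fun p => p.2) []
      (fun _ p l => l ++ [p.1]) PySem.Dict.empty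
  rw [hkeys, hfreq, PySem.Dict.items_counter, PySem.Dict.keys_empty,
    PySem.Set.update_nil_left, List.map_map]
  rfl

theorem pv_Bbuckets_getD (chars : List Char) (n : Int) :
    (pvBbuckets (pvBfreq chars)).getD n []
      = (PySem.Set.ofList chars).filter (fun k => (chars.count k : Int) == n) := by
  have hfreq : pvBfreq chars = PySem.Dict.counter chars :=
    PySem.Dict.foldl_insert_getD_add_one_eq_counter chars
  have hswap : pvBbuckets (pvBfreq chars)
      = (((pvBfreq chars).items.map (fun p => (p.2, p.1))).foldl
          (fun (b : PySem.Dict Int (List Char)) q => b.modify q.1 [] (fun l => l ++ [q.2]))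
          PySem.Dict.empty) := by
    rw [List.foldl_map]
    rfl
  rw [hswap, PySem.Dict.getD_foldl_modify_append, hfreq, PySem.Dict.items_counter]
  simp [List.filter_map, List.map_map, Function.comp_def]

theorem pv_main (string : String) : ktrakytu string = ktrakytu_alt string := by
  show pvFmt (pvAloop2 (pvRemoveSpaces string.toList) (pvAloop1 (pvRemoveSpaces string.toList)).2)
        (pvAloop1 (pvRemoveSpaces string.toList)).2
      = pvFmt ((pvBbuckets (pvBfreq (string.toList.filter (fun c => !(c == ' '))))).getD
          (match PySem.List.max? (PySem.Dict.keys (pvBbuckets (pvBfreq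
              (string.toList.filter (fun c => !(c == ' ')))))) (fun y => y) with
            | some m => m | none => 0) [])
        (match PySem.List.max? (PySem.Dict.keys (pvBbuckets (pvBfreq
            (string.toList.filter (fun c => !(c == ' ')))))) (fun y => y) with
          | some m => m | none => 0)
  rw [pvRemoveSpaces_eq]
  set s := string.toList.filter (fun c => !(c == ' ')) with hs
  -- the two maxima agree: same membership
  have hmax : (pvAloop1 s).2
      = (match PySem.List.max? (PySem.Dict.keys (pvBbuckets (pvBfreq s))) (fun y => y) with
          | some m => m
          | none => 0) := by
    rw [pv_Amax]
    have hmem : ∀ x, x ∈ s.map (fun c => (s.count c : Int))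
        ↔ x ∈ (PySem.Dict.keys (pvBbuckets (pvBfreq s))) := by
      intro x
      rw [pv_Bbuckets_keys]
      simp [PySem.Set.mem_ofList, List.mem_map]
    have := pv_max_congr _ _ hmem
    rw [this]
    cases PySem.List.max? (PySem.Dict.keys (pvBbuckets (pvBfreq s))) (fun y => y) <;> rfl
  rw [hmax, pv_Akq, pv_Bbuckets_getD]

-- ===== VERDICT (by name: the statement is the Claim_ definition above) =====
theorem ktrakytu_spec : Claim_equal_ktrakytu := by
  intro string _
  exact pv_main string
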